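-- pv_equiv track=rewrite | github.com/pypi-data/pypi-mirror-287 | packages/rupersonaagent/rupersonaagent-0.2.0-py3-none-any.whl/internet_memory_model/in_dataset.py | reduce_passages_count
-- ===== SOURCE A (Python) =====
-- def reduce_passages_count(passages, is_used, count):
--     result_passages = []
--     result_used = []
--     total_count = 0
--     for i in range(len(passages)):
--         if total_count >= count:
--             break
--         if is_used[i]:
--             result_passages.append(passages[i])
--             result_used.append(is_used[i])
--             total_count += 1
--     for i in range(len(passages)):
--         if total_count >= count:
--             break
--         if not is_used[i]:
--             result_passages.append(passages[i])
--             result_used.append(is_used[i])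
--             total_count += 1
--     return result_passages, result_used
-- ===== SOURCE B (Python) =====
-- def reduce_passages_count(passages, is_used, count):
--     flags = is_used[:len(passages)]
--     order = sorted(range(len(flags)), key=lambda i: not flags[i])
--     take = order[:max(count, 0)]
--     return [passages[i] for i in take], [is_used[i] for i in take]
-- ===== Notes on version B (the rewrite author's own statement) =====
-- stated objective: alternative
-- what changed: B builds the selection order by a stable sort of the indices on the key 'not used' (used-first) over is_used[:len(passages)] and slices the first max(count,0), instead of A's two break-terminated counting scans; A's return set is kept exactly (Pre_ excludes only A's IndexError inputs).
import Mathlib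
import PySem

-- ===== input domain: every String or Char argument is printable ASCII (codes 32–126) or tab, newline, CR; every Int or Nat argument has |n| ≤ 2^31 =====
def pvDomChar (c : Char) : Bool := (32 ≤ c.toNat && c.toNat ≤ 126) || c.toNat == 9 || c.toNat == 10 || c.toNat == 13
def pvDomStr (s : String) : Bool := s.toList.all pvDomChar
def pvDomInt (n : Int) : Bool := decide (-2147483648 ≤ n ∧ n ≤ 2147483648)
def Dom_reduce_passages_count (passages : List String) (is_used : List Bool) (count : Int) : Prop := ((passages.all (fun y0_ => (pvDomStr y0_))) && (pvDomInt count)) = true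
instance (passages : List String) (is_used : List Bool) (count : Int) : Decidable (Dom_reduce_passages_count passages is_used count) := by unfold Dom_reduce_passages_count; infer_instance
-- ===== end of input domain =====

-- B forms the selection order by a STABLE SORT of the indices on the key "not used" and slices
-- the first max(count,0), instead of A's two break-terminated counting scans (objective: alternative).


-- ===== PORT A =====
-- first loop of A: take used passages until total_count >= count (break).
-- pyGetD is exact here: Pre_ guarantees every index A actually touches is in range.
def pvA_loop1 (passages : List String) (is_used : List Bool) (count : Int) :
    List Nat → List String × List Bool × Int → List String × List Bool × Int
  | [], st => st
  | i :: rest, (rp, ru, tc) =>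
    if tc ≥ count then (rp, ru, tc)
    else if PySem.List.pyGetD is_used (i : Int) false then
      pvA_loop1 passages is_used count rest
        (rp ++ [PySem.List.pyGetD passages (i : Int) ""],
         ru ++ [PySem.List.pyGetD is_used (i : Int) false], tc + 1)
    else pvA_loop1 passages is_used count rest (rp, ru, tc)

-- second loop of A: take unused passages until total_count >= count (break).
def pvA_loop2 (passages : List String) (is_used : List Bool) (count : Int) :
    List Nat → List String × List Bool × Int → List String × List Bool × Int
  | [], st => st
  | i :: rest, (rp, ru, tc) =>
    if tc ≥ count then (rp, ru, tc)
    else if !(PySem.List.pyGetD is_used (i : Int) false) then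
      pvA_loop2 passages is_used count rest
        (rp ++ [PySem.List.pyGetD passages (i : Int) ""],
         ru ++ [PySem.List.pyGetD is_used (i : Int) false], tc + 1)
    else pvA_loop2 passages is_used count rest (rp, ru, tc)

def reduce_passages_count (passages : List String) (is_used : List Bool) (count : Int) : List String × List Bool :=
  let st2 := pvA_loop2 passages is_used count (List.range passages.length)
    (pvA_loop1 passages is_used count (List.range passages.length) ([], [], 0))
  (st2.1, st2.2.1)

-- ===== PORT B =====
-- Source B: flags = is_used[:len(passages)]; order = sorted(range(len(flags)), key=lambda i: not flags[i]);
-- take = order[:max(count, 0)]; return [passages[i] for i in take], [is_used[i] for i in take].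
-- Every index in `take` is < len(flags) ≤ min(len(passages), len(is_used)), so pyGetD is exact.
def reduce_passages_count_alt (passages : List String) (is_used : List Bool) (count : Int) : List String × List Bool :=
  let flags := PySem.List.slice is_used none (some (passages.length : Int))
  let order := PySem.List.sorted (List.range flags.length)
    (fun i => !(PySem.List.pyGetD flags (i : Int) false))
  let take := order.take (max count 0).toNat
  (take.map (fun (i : Nat) => PySem.List.pyGetD passages (i : Int) ""),
   take.map (fun (i : Nat) => PySem.List.pyGetD is_used (i : Int) false))

-- ===== PRECONDITION & SPEC =====
-- Pre_ is exactly the set of inputs on which Python A returns: A raises IndexError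
-- (is_used[i] out of range) precisely when is_used is shorter than passages AND the first
-- loop runs out of True flags before reaching count; Pre_ excludes no input A returns on.
def Pre_reduce_passages_count (passages : List String) (is_used : List Bool) (count : Int) : Prop :=
  passages.length ≤ is_used.length ∨ count ≤ (is_used.countP (fun b => b) : Int)
instance (passages : List String) (is_used : List Bool) (count : Int) : Decidable (Pre_reduce_passages_count passages is_used count) := by unfold Pre_reduce_passages_count; infer_instance

def pvWitness_reduce_passages_count : List String × List Bool × Int := (["a", "b", "c"], [false, true, false], 2)

def Spec_reduce_passages_count (passages : List String) (is_used : List Bool) (count : Int) (out : List String × List Bool) : Prop := out = reduce_passages_count_alt passages is_used count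
instance (passages : List String) (is_used : List Bool) (count : Int) (out : List String × List Bool) : Decidable (Spec_reduce_passages_count passages is_used count out) := by unfold Spec_reduce_passages_count; infer_instance

-- ===== CLAIM (what is proved, stated in full; the proofs are below) =====
def Claim_equal_reduce_passages_count : Prop := ∀ (passages : List String) (is_used : List Bool) (count : Int), Dom_reduce_passages_count passages is_used count → Pre_reduce_passages_count passages is_used count → Spec_reduce_passages_count passages is_used count (reduce_passages_count passages is_used count)
-- ===== LEMMAS AND PROOFS =====

-- abstract versions of A's loops, recursing on the list of (passage, flag) pairs
def pvGo1 (count : Int) : List (String × Bool) → List String × List Bool × Int → List String × List Bool × Int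
  | [], st => st
  | (p, u) :: rest, (rp, ru, tc) =>
    if tc ≥ count then (rp, ru, tc)
    else if u then pvGo1 count rest (rp ++ [p], ru ++ [u], tc + 1)
    else pvGo1 count rest (rp, ru, tc)

def pvGo2 (count : Int) : List (String × Bool) → List String × List Bool × Int → List String × List Bool × Int
  | [], st => st
  | (p, u) :: rest, (rp, ru, tc) =>
    if tc ≥ count then (rp, ru, tc)
    else if !u then pvGo2 count rest (rp ++ [p], ru ++ [u], tc + 1)
    else pvGo2 count rest (rp, ru, tc)

theorem pvA_loop1_eq_go1 (passages : List String) (is_used : List Bool) (count : Int)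
    (l : List Nat) (st : List String × List Bool × Int) :
    pvA_loop1 passages is_used count l st =
      pvGo1 count (l.map (fun (i : Nat) => (PySem.List.pyGetD passages (i : Int) "", PySem.List.pyGetD is_used (i : Int) false))) st := by
  induction l generalizing st with
  | nil => rfl
  | cons i rest ih =>
    obtain ⟨rp, ru, tc⟩ := st
    simp only [pvA_loop1, List.map_cons, pvGo1]
    split_ifs <;> simp [ih]

theorem pvA_loop2_eq_go2 (passages : List String) (is_used : List Bool) (count : Int)
    (l : List Nat) (st : List String × List Bool × Int) :
    pvA_loop2 passages is_used count l st =
      pvGo2 count (l.map (fun (i : Nat) => (PySem.List.pyGetD passages (i : Int) "", PySem.List.pyGetD is_used (i : Int) false))) st := by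
  induction l generalizing st with
  | nil => rfl
  | cons i rest ih =>
    obtain ⟨rp, ru, tc⟩ := st
    simp only [pvA_loop2, List.map_cons, pvGo2]
    split_ifs <;> simp [ih]

theorem pvGo1_char (count : Int) (pairs : List (String × Bool)) (rp : List String) (ru : List Bool) (tc : Int) :
    pvGo1 count pairs (rp, ru, tc) =
      (rp ++ ((pairs.filter (fun pu => pu.2)).take (count - tc).toNat).map Prod.fst,
       ru ++ ((pairs.filter (fun pu => pu.2)).take (count - tc).toNat).map Prod.snd,
       tc + ((pairs.filter (fun pu => pu.2)).take (count - tc).toNat).length) := by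
  induction pairs generalizing rp ru tc with
  | nil => simp [pvGo1]
  | cons pu rest ih =>
    obtain ⟨p, u⟩ := pu
    simp only [pvGo1]
    by_cases htc : tc ≥ count
    · have h0 : (count - tc).toNat = 0 := by omega
      rw [if_pos htc]
      simp [h0]
    · rw [if_neg htc]
      have hpos : (count - tc).toNat = (count - (tc + 1)).toNat + 1 := by omega
      by_cases hu : u
      · rw [if_pos hu, ih]
        simp [hu, hpos, List.take_succ_cons]
        omega
      · rw [if_neg hu, ih]
        simp [hu]

theorem pvGo2_char (count : Int) (pairs : List (String × Bool)) (rp : List String) (ru : List Bool) (tc : Int) :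
    pvGo2 count pairs (rp, ru, tc) =
      (rp ++ ((pairs.filter (fun pu => !pu.2)).take (count - tc).toNat).map Prod.fst,
       ru ++ ((pairs.filter (fun pu => !pu.2)).take (count - tc).toNat).map Prod.snd,
       tc + ((pairs.filter (fun pu => !pu.2)).take (count - tc).toNat).length) := by
  induction pairs generalizing rp ru tc with
  | nil => simp [pvGo2]
  | cons pu rest ih =>
    obtain ⟨p, u⟩ := pu
    simp only [pvGo2]
    by_cases htc : tc ≥ count
    · have h0 : (count - tc).toNat = 0 := by omega
      rw [if_pos htc]
      simp [h0]
    · rw [if_neg htc]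
      have hpos : (count - tc).toNat = (count - (tc + 1)).toNat + 1 := by omega
      by_cases hu : u
      · have hb : (!u) = false := by simp [hu]
        rw [hb, if_neg (by simp), ih]
        simp [hu]
      · have hb : (!u) = true := by simp [hu]
        rw [hb, if_pos rfl, ih]
        simp [hu, hpos, List.take_succ_cons]
        omega

-- stable insertion of x into F ++ T where F carries key false and T carries key true
theorem pvInsertBy_bool {α : Type} (key : α → Bool) (x : α) (F T : List α)
    (hF : ∀ a ∈ F, key a = false) (hT : ∀ a ∈ T, key a = true) :
    PySem.List.insertBy (fun a b => decide (key a < key b)) x (F ++ T) =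
      if key x then F ++ T ++ [x] else F ++ x :: T := by
  revert hF
  induction F with
  | nil =>
    intro hF
    by_cases hx : key x
    · rw [if_pos hx]
      have hside : ∀ y ∈ ([] : List α) ++ T, (fun a b => decide (key a < key b)) x y = false := by
        intro y hy
        simp [hx, Bool.lt_iff]
      rw [PySem.List.insertBy_of_forall_not_before _ _ _ hside]
    · rw [if_neg hx]
      cases T with
      | nil => simp [PySem.List.insertBy]
      | cons t ts =>
        have := hT t (by simp)
        simp only [List.nil_append, PySem.List.insertBy]
        have hxf : key x = false := by simpa using hx
        simp [this, hxf]
  | cons f F' ih =>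
    intro hF
    have hf := hF f (by simp)
    simp only [List.cons_append, PySem.List.insertBy]
    have : decide (key x < key f) = false := by simp [hf, Bool.lt_iff]
    rw [this]
    simp only [Bool.false_eq_true, if_false]
    rw [ih (fun a ha => hF a (by simp [ha]))]
    by_cases hx : key x <;> simp [hx]

theorem pvFoldl_insertBy_bool {α : Type} (key : α → Bool) (xs F T : List α)
    (hF : ∀ a ∈ F, key a = false) (hT : ∀ a ∈ T, key a = true) :
    xs.foldl (fun acc x => PySem.List.insertBy (fun a b => decide (key a < key b)) x acc) (F ++ T) =
      (F ++ xs.filter (fun a => !(key a))) ++ (T ++ xs.filter key) := by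
  induction xs generalizing F T with
  | nil => simp
  | cons x rest ih =>
    simp only [List.foldl_cons, List.filter_cons]
    rw [pvInsertBy_bool key x F T hF hT]
    by_cases hx : key x
    · rw [if_pos hx]
      rw [show F ++ T ++ [x] = F ++ (T ++ [x]) by simp]
      rw [ih F (T ++ [x]) hF (by intro a ha; rcases List.mem_append.1 ha with h | h
                                 · exact hT a h
                                 · simpa [List.mem_singleton.1 h] using hx)]
      simp [hx]
    · rw [if_neg hx]
      rw [show F ++ x :: T = (F ++ [x]) ++ T by simp]
      rw [ih (F ++ [x]) T (by intro a ha; rcases List.mem_append.1 ha with h | h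
                              · exact hF a h
                              · simpa [List.mem_singleton.1 h] using hx) hT]
      simp [hx]

-- Python's stable sort on a Bool key is exactly "false-key elements first, true-key after"
theorem pvSorted_bool {α : Type} (xs : List α) (key : α → Bool) :
    PySem.List.sorted xs key = xs.filter (fun a => !(key a)) ++ xs.filter key := by
  rw [PySem.List.sorted_eq_foldl_insertBy]
  have := pvFoldl_insertBy_bool key xs [] [] (by simp) (by simp)
  simpa using this

-- filtering a getD-predicate over range n equals filtering over range m when entries ≥ m are absent
theorem pvFilter_range_trunc (p : Nat → Bool) (m n : Nat) (hmn : m ≤ n)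
    (h : ∀ i, m ≤ i → p i = false) :
    (List.range n).filter p = (List.range m).filter p := by
  induction n with
  | zero => have : m = 0 := by omega
            simp [this]
  | succ k ih =>
    by_cases hk : m ≤ k
    · rw [List.range_succ, List.filter_append, ih hk]
      simp [h k hk]
    · have : m = k + 1 := by omega
      simp [this]

-- number of in-range True flags picked up by a scan over range n (is_used fully covered)
theorem pvCount_range (xs : List Bool) (n : Nat) (hn : xs.length ≤ n) :
    ((List.range n).filter (fun i => xs.getD i false)).length = xs.countP (fun b => b) := by
  rw [pvFilter_range_trunc _ xs.length n hn
      (by intro i hi; simp [List.getD_eq_getElem?_getD, List.getElem?_eq_none (by omega)])]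
  have hmap : (List.range xs.length).map (fun i => xs.getD i false) = xs := by
    apply List.ext_getElem
    · simp
    · intro i h1 h2
      simp [List.getD_eq_getElem?_getD, List.getElem?_eq_getElem h2]
  calc ((List.range xs.length).filter (fun i => xs.getD i false)).length
      = (List.range xs.length).countP (fun i => xs.getD i false) := List.countP_eq_length_filter.symm
    _ = ((List.range xs.length).map (fun i => xs.getD i false)).countP (fun b => b) := by
        rw [List.countP_map]; rfl
    _ = xs.countP (fun b => b) := by rw [hmap]

-- characterization of A: indices of used flags then unused flags, clamped takes, mapped to values
theorem pvA_char (passages : List String) (is_used : List Bool) (count : Int) :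
    reduce_passages_count passages is_used count =
      ((((List.range passages.length).filter (fun i => is_used.getD i false)).take count.toNat ++
        ((List.range passages.length).filter (fun i => !(is_used.getD i false))).take
          (count.toNat - ((List.range passages.length).filter (fun i => is_used.getD i false)).length)).map
          (fun i => passages.getD i ""),
       (((List.range passages.length).filter (fun i => is_used.getD i false)).take count.toNat ++
        ((List.range passages.length).filter (fun i => !(is_used.getD i false))).take
          (count.toNat - ((List.range passages.length).filter (fun i => is_used.getD i false)).length)).map
          (fun i => is_used.getD i false)) := by
  simp only [reduce_passages_count]
  rw [pvA_loop1_eq_go1, pvGo1_char, pvA_loop2_eq_go2, pvGo2_char]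
  simp only [PySem.List.pyGetD_natCast, List.filter_map, Function.comp_def, ← List.map_take,
    List.map_map, List.length_map, List.length_take]
  have h2 : (count - (0 + (↑(min count.toNat
      ((List.range passages.length).filter (fun i => is_used.getD i false)).length) : Int))).toNat
      = count.toNat - ((List.range passages.length).filter (fun i => is_used.getD i false)).length := by
    omega
  have h1 : (count - 0).toNat = count.toNat := by omega
  rw [h1, h2]
  simp [List.map_append]

-- characterization of B: same shape, with indices drawn from range (min len-passages len-is_used)
theorem pvB_char (passages : List String) (is_used : List Bool) (count : Int) :
    reduce_passages_count_alt passages is_used count =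
      ((((List.range (min passages.length is_used.length)).filter (fun i => is_used.getD i false)).take count.toNat ++
        ((List.range (min passages.length is_used.length)).filter (fun i => !(is_used.getD i false))).take
          (count.toNat - ((List.range (min passages.length is_used.length)).filter (fun i => is_used.getD i false)).length)).map
          (fun i => passages.getD i ""),
       (((List.range (min passages.length is_used.length)).filter (fun i => is_used.getD i false)).take count.toNat ++
        ((List.range (min passages.length is_used.length)).filter (fun i => !(is_used.getD i false))).take
          (count.toNat - ((List.range (min passages.length is_used.length)).filter (fun i => is_used.getD i false)).length)).map
          (fun i => is_used.getD i false)) := by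
  simp only [reduce_passages_count_alt]
  rw [PySem.List.slice_to is_used (by exact_mod_cast Int.natCast_nonneg passages.length)]
  rw [pvSorted_bool]
  simp only [PySem.List.pyGetD_natCast, Int.toNat_natCast, List.length_take, Bool.not_not]
  have hgd : ∀ i ∈ List.range (min passages.length is_used.length),
      (is_used.take passages.length).getD i false = is_used.getD i false := by
    intro i hi
    have hi' : i < min passages.length is_used.length := by simpa using hi
    have hi2 : i < passages.length := by omega
    simp [List.getD_eq_getElem?_getD, hi2]
  have hfeT : (List.range (min passages.length is_used.length)).filter
        (fun i => (is_used.take passages.length).getD i false) =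
      (List.range (min passages.length is_used.length)).filter (fun i => is_used.getD i false) :=
    List.filter_congr (fun i hi => by rw [hgd i hi])
  have hfeF : (List.range (min passages.length is_used.length)).filter
        (fun i => !(is_used.take passages.length).getD i false) =
      (List.range (min passages.length is_used.length)).filter (fun i => !(is_used.getD i false)) :=
    List.filter_congr (fun i hi => by rw [hgd i hi])
  have hC : (max count 0).toNat = count.toNat := by omega
  rw [hfeT, hfeF, hC, List.take_append]

-- ===== VERDICT (by name: the statement is the Claim_ definition above) =====
theorem reduce_passages_count_spec : Claim_equal_reduce_passages_count := by
  intro passages is_used count _ hpre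
  unfold Spec_reduce_passages_count
  unfold Pre_reduce_passages_count at hpre
  rw [pvA_char, pvB_char]
  have hIU : (List.range passages.length).filter (fun i => is_used.getD i false) =
      (List.range (min passages.length is_used.length)).filter (fun i => is_used.getD i false) := by
    by_cases h : passages.length ≤ is_used.length
    · rw [Nat.min_eq_left h]
    · rw [Nat.min_eq_right (by omega)]
      apply pvFilter_range_trunc _ _ _ (by omega)
      intro i hi
      simp [List.getD_eq_getElem?_getD, List.getElem?_eq_none (by omega)]
  by_cases h : passages.length ≤ is_used.length
  · rw [hIU, Nat.min_eq_left h]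
  · -- is_used shorter: Pre_ forces count ≤ #True, so the unused take is empty on both sides
    have hcnt : ((List.range passages.length).filter (fun i => is_used.getD i false)).length =
        is_used.countP (fun b => b) := pvCount_range is_used passages.length (by omega)
    have hle : count ≤ (is_used.countP (fun b => b) : Int) := by
      rcases hpre with h' | h'
      · omega
      · exact h'
    have hz : count.toNat - ((List.range passages.length).filter (fun i => is_used.getD i false)).length = 0 := by
      omega
    rw [hIU] at hz ⊢
    rw [hz]
    simp
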